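-- pv_equiv track=rewrite | github.com/ChineseResearcher/l33tc0d3-dump | graph/Q2014 Longest Subsequence Repeated k Times.py | longestSubsequenceRepeatedK
-- ===== SOURCE A (Python) =====
-- from collections import Counter, deque
--
-- def longestSubsequenceRepeatedK(s: str, k: int) -> str:
--
--     def detect(pat, s, k):
--
--         pat = ''.join(pat) * k
--
--         j = 0 # pointer for pat
--         for char in s:
--
--             if char == pat[j]:
--                 j += 1
--                 if j == len(pat):
--                     return True
--
--         return False
--
--     # perform a freq. count and only keep characters that
--     # have at least k occurrences initially
--     freq = {key: v for key, v in Counter(s).items() if v >= k}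
--
--     # although tag suggests backtracking, which would check from
--     # longest to shortest, BFS turns out to be much faster
--     ans, q = '', deque([''])
--     while q:
--
--         curr = q.popleft()
--         for char in freq.keys():
--
--             new_pat = curr + char
--             if detect(new_pat, s, k):
--                 if len(new_pat) > len(ans):
--                     ans = new_pat
--                 else:
--                     ans = max(ans, new_pat)
--
--                 # bfs enqueue
--                 q.append(new_pat)
--
--     return ans
-- ===== SOURCE B (Python) =====
-- from collections import Counter
--
-- def longestSubsequenceRepeatedK(s: str, k: int) -> str:
--
--     def detect(pat, s, k):
--
--         pat = ''.join(pat) * k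
--
--         j = 0 # pointer for pat
--         for char in s:
--
--             if char == pat[j]:
--                 j += 1
--                 if j == len(pat):
--                     return True
--
--         return False
--
--     # eligible characters: at least k occurrences; a sorted, duplicate-free list
--     chars = sorted(c for c, v in Counter(s).items() if v >= k)
--
--     best = ''
--
--     # depth-first search over the prefix-closed tree of valid patterns,
--     # keeping the best (longest, then lexicographically greatest) seen so far
--     def dfs(curr):
--         nonlocal best
--         for c in chars:
--             cand = curr + c
--             if detect(cand, s, k):
--                 if len(cand) > len(best) or (len(cand) == len(best) and cand > best):
--                     best = cand
--                 dfs(cand)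
--
--     dfs('')
--     return best
-- ===== Notes on version B (the rewrite author's own statement) =====
-- stated objective: alternative
-- what changed: Replaces A's BFS queue (Counter-keyed eligible chars, deque, implicit same-length tie handling) by a recursive DFS over the prefix-closed tree of valid patterns with a sorted duplicate-free eligible-char list and an explicit (length, then lexicographic) best update; the selection criterion is order-independent, so the global best is identical.
import Mathlib
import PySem

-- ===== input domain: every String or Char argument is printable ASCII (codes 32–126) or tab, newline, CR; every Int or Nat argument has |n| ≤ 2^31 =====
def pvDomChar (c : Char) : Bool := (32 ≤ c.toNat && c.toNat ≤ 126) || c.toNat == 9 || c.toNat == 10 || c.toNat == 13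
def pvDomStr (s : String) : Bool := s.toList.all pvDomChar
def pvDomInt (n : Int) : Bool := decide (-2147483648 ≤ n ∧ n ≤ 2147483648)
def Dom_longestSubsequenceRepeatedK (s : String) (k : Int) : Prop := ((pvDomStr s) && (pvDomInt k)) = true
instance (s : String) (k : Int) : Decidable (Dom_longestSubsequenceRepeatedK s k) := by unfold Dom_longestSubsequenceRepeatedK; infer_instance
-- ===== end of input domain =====

-- B replaces A's BFS queue by a recursive DFS over the prefix-closed tree of valid
-- patterns (sorted duplicate-free eligible chars, explicit (length, lex) best update);
-- objective: alternative (same asymptotic cost, genuinely different traversal).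


-- ===== PORT A =====

-- `pat * k` for a string-as-list (Python repetition; k ≤ 0 gives the empty string)
def pvRepeat (pat : List Char) (k : Int) : List Char := (List.replicate k.toNat pat).flatten

-- the `for char in s` loop of detect, with pointer j into pat;
-- `pat[j]` out of range (only reachable for pat = '', i.e. k ≤ 0: Python raises
-- IndexError there, outside Pre_) is treated as a mismatch
def pvDetectLoop (patk : List Char) (rest : List Char) (j : Nat) : Bool :=
  match rest with
  | [] => false
  | c :: rest' =>
    match patk[j]? with
    | some pj =>
      if c = pj then
        (if j + 1 = patk.length then true else pvDetectLoop patk rest' (j + 1))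
      else pvDetectLoop patk rest' j
    | none => pvDetectLoop patk rest' j

-- detect(pat, s, k): greedy scan of s for pat*k as a subsequence (shared helper of
-- A and B — B's Python contains the identical detect function verbatim)
def pvDetect (pat : List Char) (s : List Char) (k : Int) : Bool :=
  pvDetectLoop (pvRepeat pat k) s 0

-- `if len(new_pat) > len(ans): ans = new_pat  else: ans = max(ans, new_pat)`
def pvOpA (ans cand : List Char) : List Char :=
  if ans.length < cand.length then cand
  else (if ans < cand then cand else ans)   -- max(ans, new_pat)

-- the BFS while-loop; state = (queue, ans); the inner `for char in freq.keys()` is a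
-- fold updating ans and enqueueing in one pass; fuel only guards termination
def pvBfs (s : List Char) (k : Int) (chars : List Char) :
    Nat → List (List Char) → List Char → List Char
  | 0, _, ans => ans
  | _ + 1, [], ans => ans
  | fuel + 1, curr :: q, ans =>
    let st := chars.foldl
      (fun (st : List (List Char) × List Char) c =>
        let np := curr ++ [c]
        if pvDetect np s k then (st.1 ++ [np], pvOpA st.2 np) else st)
      (q, ans)
    pvBfs s k chars fuel st.1 st.2

def longestSubsequenceRepeatedK (s : String) (k : Int) : String :=
  let sl := s.toList
  -- freq = {key: v for key, v in Counter(s).items() if v >= k}; BFS iterates freq.keys()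
  let chars := ((PySem.Dict.counter sl).items.filter (fun kv => k ≤ kv.2)).map Prod.fst
  String.mk (pvBfs sl k chars ((chars.length + 1) ^ (sl.length + 2)) [[]] [])

-- ===== PORT B =====

-- `len(cand) > len(best) or (len(cand) == len(best) and cand > best)`
def pvOpB (best cand : List Char) : List Char :=
  if best.length < cand.length ∨ (best.length = cand.length ∧ best < cand) then cand
  else best

-- dfs(curr): for c in the pending suffix cs of chars: cand = curr + c; if detect:
-- update best, recurse into cand (fresh chars list); fuel only guards termination
def pvDfs (s : List Char) (k : Int) (chars : List Char) :
    Nat → List Char → List Char → List Char → List Char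
  | _, _, [], best => best
  | fuel, curr, c :: cs, best =>
    let cand := curr ++ [c]
    if pvDetect cand s k then
      let sub := match fuel with
        | 0 => pvOpB best cand
        | fuel' + 1 => pvDfs s k chars fuel' cand chars (pvOpB best cand)
      pvDfs s k chars fuel curr cs sub
    else pvDfs s k chars fuel curr cs best
  termination_by fuel _ cs _ => (fuel, cs.length)

def longestSubsequenceRepeatedK_alt (s : String) (k : Int) : String :=
  let sl := s.toList
  -- chars = sorted(c for c, v in Counter(s).items() if v >= k)
  let chars := PySem.List.sorted
    (((PySem.Dict.counter sl).items.filter (fun kv => k ≤ kv.2)).map Prod.fst) (fun x => x) false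
  String.mk (pvDfs sl k chars (sl.length + 1) [] chars [])

-- ===== PRECONDITION & SPEC =====
-- Pre_ excludes exactly the inputs where A raises: for k ≤ 0 with s nonempty, detect
-- builds the empty pattern and `pat[0]` raises IndexError (B raises there too).
def Pre_longestSubsequenceRepeatedK (s : String) (k : Int) : Prop := 1 ≤ k ∨ s = ""
instance (s : String) (k : Int) : Decidable (Pre_longestSubsequenceRepeatedK s k) := by
  unfold Pre_longestSubsequenceRepeatedK; infer_instance

def pvWitness_longestSubsequenceRepeatedK : String × Int := ("aba", 2)

def Spec_longestSubsequenceRepeatedK (s : String) (k : Int) (out : String) : Prop := out = longestSubsequenceRepeatedK_alt s k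
instance (s : String) (k : Int) (out : String) : Decidable (Spec_longestSubsequenceRepeatedK s k out) := by unfold Spec_longestSubsequenceRepeatedK; infer_instance

-- ===== CLAIM (what is proved, stated in full; the proofs are below) =====
def Claim_equal_longestSubsequenceRepeatedK : Prop := ∀ (s : String) (k : Int), Dom_longestSubsequenceRepeatedK s k → Pre_longestSubsequenceRepeatedK s k → Spec_longestSubsequenceRepeatedK s k (longestSubsequenceRepeatedK s k)

-- ===== LEMMAS AND PROOFS =====

-- eligibility of a character (k occurrences available)
def pvElig (sl : List Char) (k : Int) (c : Char) : Prop := c ∈ sl ∧ k ≤ (sl.count c : Int)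

-- the candidate patterns both searches enumerate: nonempty, every character eligible,
-- every nonempty prefix detected
def pvGood (sl : List Char) (k : Int) (p : List Char) : Prop :=
  p ≠ [] ∧ (∀ c ∈ p, pvElig sl k c) ∧ ∀ q, q ≠ [] → q <+: p → pvDetect q sl k = true

-- the (length, then lexicographic) selection order
def pvKeyLe (a b : List Char) : Prop := a.length < b.length ∨ (a.length = b.length ∧ a ≤ b)

theorem pvKeyLe_refl (a : List Char) : pvKeyLe a a := Or.inr ⟨rfl, le_refl a⟩

theorem pvKeyLe_trans {a b c : List Char} (h1 : pvKeyLe a b) (h2 : pvKeyLe b c) : pvKeyLe a c := by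
  rcases h1 with h1 | ⟨e1, l1⟩ <;> rcases h2 with h2 | ⟨e2, l2⟩
  · exact Or.inl (h1.trans h2)
  · exact Or.inl (e2 ▸ h1)
  · exact Or.inl (e1 ▸ h2)
  · exact Or.inr ⟨e1.trans e2, l1.trans l2⟩

theorem pvKeyLe_antisymm {a b : List Char} (h1 : pvKeyLe a b) (h2 : pvKeyLe b a) : a = b := by
  rcases h1 with h1 | ⟨e1, l1⟩ <;> rcases h2 with h2 | ⟨e2, l2⟩
  · omega
  · omega
  · omega
  · exact le_antisymm l1 l2

theorem pvKeyLe_nil (a : List Char) : pvKeyLe [] a := by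
  rcases Nat.eq_zero_or_pos a.length with h | h
  · have ha : a = [] := List.length_eq_zero_iff.mp h
    subst ha; exact pvKeyLe_refl []
  · exact Or.inl (by simpa using h)

theorem pvKeyLe_nil_iff (a : List Char) : pvKeyLe a [] ↔ a = [] := by
  constructor
  · intro h; exact pvKeyLe_antisymm h (pvKeyLe_nil a)
  · rintro rfl; exact pvKeyLe_refl []

-- ---- the graded-max update ----
theorem pvOpB_cases (a c : List Char) : pvOpB a c = a ∨ pvOpB a c = c := by
  unfold pvOpB; split <;> simp

theorem pvKeyLe_opB_left (a c : List Char) : pvKeyLe a (pvOpB a c) := by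
  unfold pvOpB; split
  · rename_i h
    rcases h with h | ⟨e, l⟩
    · exact Or.inl h
    · exact Or.inr ⟨e, le_of_lt l⟩
  · exact pvKeyLe_refl a

theorem pvKeyLe_opB_right (a c : List Char) : pvKeyLe c (pvOpB a c) := by
  unfold pvOpB; split
  · exact pvKeyLe_refl c
  · rename_i h
    rw [not_or, not_and] at h
    rcases lt_trichotomy c.length a.length with hl | hl | hl
    · exact Or.inl hl
    · rcases lt_trichotomy c a with hc | hc | hc
      · exact Or.inr ⟨hl, le_of_lt hc⟩
      · exact Or.inr ⟨hl, le_of_eq hc⟩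
      · exact absurd hc (h.2 hl.symm)
    · exact absurd hl h.1

theorem pvOpA_eq_opB (a c : List Char) (h : a.length ≤ c.length) : pvOpA a c = pvOpB a c := by
  unfold pvOpA pvOpB
  rcases Nat.lt_or_ge a.length c.length with hl | hl
  · simp [hl]
  · have he : a.length = c.length := le_antisymm h hl
    simp only [he, lt_irrefl, if_neg (lt_irrefl _)]
    by_cases hac : a < c <;> simp [hac, he]

-- ---- facts about detect ----
theorem pvDetectLoop_bound (rest : List Char) : ∀ (patk : List Char) (j : Nat),
    pvDetectLoop patk rest j = true → j < patk.length ∧ patk.length ≤ j + rest.length := by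
  induction rest with
  | nil => intro patk j h; simp [pvDetectLoop] at h
  | cons c rest ih =>
    intro patk j h
    unfold pvDetectLoop at h
    cases hg : patk[j]? with
    | none =>
      simp [hg] at h
      have h2 := ih patk j h
      simp only [List.length_cons]
      omega
    | some pj =>
      simp only [hg] at h
      by_cases hc : c = pj
      · simp only [hc] at h
        by_cases hj : j + 1 = patk.length
        · have := List.getElem?_eq_some_iff.mp hg
          simp at hj ⊢; omega
        · simp [hj] at h
          have h2 := ih patk (j+1) h
          simp only [List.length_cons]
          omega
      · simp [hc] at h
        have h2 := ih patk j h
        simp only [List.length_cons]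
        omega

theorem pvRepeat_length (pat : List Char) (k : Int) :
    (pvRepeat pat k).length = k.toNat * pat.length := by
  simp [pvRepeat]

-- within Pre_: a detected pattern is nonempty and no longer than s
theorem pvDetect_bound {sl : List Char} {k : Int} (hk : 1 ≤ k) {p : List Char}
    (h : pvDetect p sl k = true) : p ≠ [] ∧ p.length ≤ sl.length := by
  have hb := pvDetectLoop_bound sl (pvRepeat p k) 0 h
  have hlen := pvRepeat_length p k
  have hk1 : 1 ≤ k.toNat := by omega
  have hb1 := hb.1
  have hb2 := hb.2
  constructor
  · intro hnil; subst hnil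
    rw [hlen] at hb1
    simp at hb1
  · nlinarith [hb1, hb2, hlen, hk1]

-- with s = '' nothing is ever detected
theorem pvDetect_nil (p : List Char) (k : Int) : pvDetect p [] k = false := by
  simp [pvDetect, pvDetectLoop]

-- uniform form used below
theorem pvDetect_good {sl : List Char} {k : Int} (hpre : 1 ≤ k ∨ sl = []) {p : List Char}
    (h : pvDetect p sl k = true) : p ≠ [] ∧ p.length ≤ sl.length := by
  rcases hpre with hk | hs
  · exact pvDetect_bound hk h
  · subst hs; rw [pvDetect_nil] at h; exact absurd h (by simp)

-- a child of a good (or root) node is good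
theorem pvGood_child {sl : List Char} {k : Int} {h : List Char} {c : Char}
    (hh : h = [] ∨ pvGood sl k h) (hc : pvElig sl k c)
    (hv : pvDetect (h ++ [c]) sl k = true) : pvGood sl k (h ++ [c]) := by
  refine ⟨by simp, ?_, ?_⟩
  · intro x hx
    rcases List.mem_append.mp hx with hx | hx
    · rcases hh with rfl | hg
      · simp at hx
      · exact hg.2.1 x hx
    · simp at hx; subst hx; exact hc
  · intro q hq hqp
    rcases List.prefix_concat_iff.mp hqp with rfl | hqh
    · exact hv
    · rcases hh with rfl | hg
      · have : q = [] := List.prefix_nil.mp hqh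
        exact absurd this hq
      · exact hg.2.2 q hq hqh

-- a strict extension step inside a good pattern
theorem pvGood_step {sl : List Char} {k : Int} {h p : List Char}
    (hp : pvGood sl k p) (hpre : h <+: p) (hne : h ≠ p) :
    ∃ c, pvElig sl k c ∧ (h ++ [c]) <+: p ∧ pvDetect (h ++ [c]) sl k = true := by
  obtain ⟨rest, rfl⟩ := hpre
  cases rest with
  | nil => simp at hne
  | cons c rest =>
    refine ⟨c, hp.2.1 c (by simp), ⟨rest, by simp⟩, ?_⟩
    exact hp.2.2 (h ++ [c]) (by simp) ⟨rest, by simp⟩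

-- ---- the inner for-loop of A's BFS step ----
def pvChildren (sl : List Char) (k : Int) (chars : List Char) (h : List Char) : List (List Char) :=
  (chars.filter (fun c => pvDetect (h ++ [c]) sl k)).map (fun c => h ++ [c])

theorem pvBfs_foldl_eq (sl : List Char) (k : Int) (h : List Char) :
    ∀ (cs : List Char) (t : List (List Char)) (ans : List Char),
    cs.foldl (fun (st : List (List Char) × List Char) c =>
        let np := h ++ [c]
        if pvDetect np sl k then (st.1 ++ [np], pvOpA st.2 np) else st) (t, ans)
      = (t ++ (cs.filter (fun c => pvDetect (h ++ [c]) sl k)).map (fun c => h ++ [c]),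
         ((cs.filter (fun c => pvDetect (h ++ [c]) sl k)).map (fun c => h ++ [c])).foldl pvOpA ans) := by
  intro cs
  induction cs with
  | nil => intro t ans; simp
  | cons c cs ih =>
    intro t ans
    by_cases hd : pvDetect (h ++ [c]) sl k = true
    · simp only [List.foldl_cons, List.filter_cons, hd]
      rw [ih]
      simp
    · simp only [List.foldl_cons, List.filter_cons, hd]
      rw [ih]
      simp

-- properties of the answer-update fold over one level's children
theorem pvFoldAns (m : Nat) : ∀ (L : List (List Char)) (ans : List Char),
    (∀ c ∈ L, c.length = m) → ans.length ≤ m →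
    (L.foldl pvOpA ans = ans ∨ L.foldl pvOpA ans ∈ L) ∧
    pvKeyLe ans (L.foldl pvOpA ans) ∧
    (∀ c ∈ L, pvKeyLe c (L.foldl pvOpA ans)) ∧
    (L.foldl pvOpA ans).length ≤ m := by
  intro L
  induction L with
  | nil => intro ans _ hle; exact ⟨Or.inl rfl, pvKeyLe_refl ans, by simp, hle⟩
  | cons c L ih =>
    intro ans hm hle
    have hcm : c.length = m := hm c (by simp)
    have heq : pvOpA ans c = pvOpB ans c := pvOpA_eq_opB ans c (by omega)
    have hcases := pvOpB_cases ans c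
    have hlen : (pvOpA ans c).length ≤ m := by
      rw [heq]; rcases hcases with h | h <;> rw [h] <;> omega
    have ihh := ih (pvOpA ans c) (fun x hx => hm x (by simp [hx])) hlen
    simp only [List.foldl_cons]
    refine ⟨?_, ?_, ?_, ihh.2.2.2⟩
    · rcases ihh.1 with h | h
      · rw [h, heq]; rcases hcases with h2 | h2 <;> simp [h2]
      · simp [h]
    · exact pvKeyLe_trans (heq ▸ pvKeyLe_opB_left ans c) ihh.2.1
    · intro x hx
      rcases List.mem_cons.mp hx with rfl | hx
      · exact pvKeyLe_trans (heq ▸ pvKeyLe_opB_right ans x) ihh.2.1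
      · exact ihh.2.2.1 x hx

-- ---- the BFS potential ----
def pvMu (C n : Nat) (q : List (List Char)) : Nat :=
  (q.map (fun r => (C + 1) ^ (n + 1 - r.length))).sum

-- ===== BFS characterization =====
theorem pvBfs_main (sl : List Char) (k : Int) (chars : List Char)
    (hpre : 1 ≤ k ∨ sl = [])
    (hch : ∀ c, c ∈ chars ↔ pvElig sl k c) :
    ∀ (fuel : Nat) (q : List (List Char)) (ans : List Char),
    pvMu chars.length sl.length q ≤ fuel →
    (∀ r ∈ q, r = [] ∨ pvGood sl k r) →
    List.Pairwise (fun a b : List Char => a.length ≤ b.length) q →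
    (∀ a ∈ q, ∀ b ∈ q, a.length ≤ b.length + 1) →
    (∀ r ∈ q, ans.length ≤ r.length + 1) →
    (ans = [] ∨ pvGood sl k ans) →
    (∀ r ∈ q, r ≠ [] → pvKeyLe r ans) →
    (∀ p, pvGood sl k p → pvKeyLe p ans ∨ ∃ r ∈ q, r <+: p) →
    (pvBfs sl k chars fuel q ans = [] ∨ pvGood sl k (pvBfs sl k chars fuel q ans)) ∧
    (∀ p, pvGood sl k p → pvKeyLe p (pvBfs sl k chars fuel q ans)) := by
  intro fuel
  induction fuel with
  | zero =>
    intro q ans hmu hq hpw hwin hlen hans hqans hcomp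
    have hqnil : q = [] := by
      cases q with
      | nil => rfl
      | cons h t =>
        exfalso
        have hpos : 0 < (chars.length + 1) ^ (sl.length + 1 - h.length) :=
          pow_pos (Nat.succ_pos _) _
        simp only [pvMu, List.map_cons, List.sum_cons] at hmu
        omega
    subst hqnil
    simp only [pvBfs]
    refine ⟨hans, ?_⟩
    intro p hp
    rcases hcomp p hp with h | ⟨r, hr, _⟩
    · exact h
    · simp at hr
  | succ fuel ih =>
    intro q ans hmu hq hpw hwin hlen hans hqans hcomp
    cases q with
    | nil =>
      simp only [pvBfs]
      refine ⟨hans, ?_⟩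
      intro p hp
      rcases hcomp p hp with h | ⟨r, hr, _⟩
      · exact h
      · simp at hr
    | cons h t =>
      have hh : h = [] ∨ pvGood sl k h := hq h (by simp)
      have hhn : h.length ≤ sl.length := by
        rcases hh with rfl | hg
        · simp
        · exact (pvDetect_good hpre (hg.2.2 h hg.1 (List.prefix_refl h))).2
      have hstep := pvBfs_foldl_eq sl k h chars t ans
      simp only [pvBfs]
      rw [hstep]
      dsimp only
      set L := (chars.filter (fun c => pvDetect (h ++ [c]) sl k)).map (fun c => h ++ [c]) with hLdef
      set ans' := L.foldl pvOpA ans with hansdef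
      have hmemL : ∀ v ∈ L, ∃ c, c ∈ chars ∧ pvDetect (h ++ [c]) sl k = true ∧ v = h ++ [c] := by
        intro v hv
        rw [hLdef] at hv
        simp only [List.mem_map, List.mem_filter] at hv
        obtain ⟨c, ⟨hc1, hc2⟩, rfl⟩ := hv
        exact ⟨c, hc1, hc2, rfl⟩
      have hLlen : ∀ v ∈ L, v.length = h.length + 1 := by
        intro v hv; obtain ⟨c, _, _, rfl⟩ := hmemL v hv; simp
      have hLgood : ∀ v ∈ L, pvGood sl k v := by
        intro v hv; obtain ⟨c, hc, hd, rfl⟩ := hmemL v hv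
        exact pvGood_child hh ((hch c).mp hc) hd
      have hanslen : ans.length ≤ h.length + 1 := hlen h (by simp)
      have hfold := pvFoldAns (h.length + 1) L ans hLlen hanslen
      have hLsize : L.length ≤ chars.length := by
        rw [hLdef]; simpa using List.length_filter_le _ chars
      have hmu' : pvMu chars.length sl.length (t ++ L) ≤ fuel := by
        have hX : 0 < (chars.length + 1) ^ (sl.length - h.length) := pow_pos (Nat.succ_pos _) _
        have hLmu : pvMu chars.length sl.length L ≤
            L.length * (chars.length + 1) ^ (sl.length - h.length) := by
          have hb : ∀ x ∈ L.map (fun r => (chars.length + 1) ^ (sl.length + 1 - r.length)),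
              x ≤ (chars.length + 1) ^ (sl.length - h.length) := by
            intro x hx
            simp only [List.mem_map] at hx
            obtain ⟨r, hr, rfl⟩ := hx
            have he : sl.length + 1 - r.length = sl.length - h.length := by
              rw [hLlen r hr]; omega
            rw [he]
          have := List.sum_le_card_nsmul
            (L.map fun r => (chars.length + 1) ^ (sl.length + 1 - r.length))
            ((chars.length + 1) ^ (sl.length - h.length)) hb
          simpa [pvMu, smul_eq_mul] using this
        have hsplit : pvMu chars.length sl.length (t ++ L)
            = pvMu chars.length sl.length t + pvMu chars.length sl.length L := by
          simp [pvMu]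
        have hcons : pvMu chars.length sl.length (h :: t)
            = (chars.length + 1) ^ (sl.length + 1 - h.length) + pvMu chars.length sl.length t := by
          simp [pvMu]
        have hexp : sl.length + 1 - h.length = (sl.length - h.length) + 1 := by omega
        have hpow : (chars.length + 1) ^ (sl.length + 1 - h.length)
            = (chars.length + 1) ^ (sl.length - h.length) * (chars.length + 1) := by
          rw [hexp, pow_succ]
        rw [hcons, hpow] at hmu
        have hkey : chars.length * (chars.length + 1) ^ (sl.length - h.length)
            + (chars.length + 1) ^ (sl.length - h.length)
            + pvMu chars.length sl.length t ≤ fuel + 1 := by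
          calc chars.length * (chars.length + 1) ^ (sl.length - h.length)
              + (chars.length + 1) ^ (sl.length - h.length)
              + pvMu chars.length sl.length t
              = (chars.length + 1) ^ (sl.length - h.length) * (chars.length + 1)
                + pvMu chars.length sl.length t := by ring
            _ ≤ fuel + 1 := hmu
        have h5 : pvMu chars.length sl.length L
            ≤ chars.length * (chars.length + 1) ^ (sl.length - h.length) :=
          le_trans hLmu (Nat.mul_le_mul_right _ hLsize)
        rw [hsplit]
        linarith [hkey, h5, hX]
      have hq' : ∀ r ∈ t ++ L, r = [] ∨ pvGood sl k r := by
        intro r hr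
        rcases List.mem_append.mp hr with hr | hr
        · exact hq r (by simp [hr])
        · exact Or.inr (hLgood r hr)
      have hpw' : List.Pairwise (fun a b : List Char => a.length ≤ b.length) (t ++ L) := by
        rw [List.pairwise_append]
        refine ⟨hpw.of_cons, List.pairwise_of_forall_mem_list ?_, ?_⟩
        · intro a ha b hb; rw [hLlen a ha, hLlen b hb]
        · intro a ha b hb
          have := hwin a (by simp [ha]) h (by simp)
          rw [hLlen b hb]; omega
      have hwin' : ∀ a ∈ t ++ L, ∀ b ∈ t ++ L, a.length ≤ b.length + 1 := by
        intro a ha b hb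
        rcases List.mem_append.mp ha with ha | ha <;> rcases List.mem_append.mp hb with hb | hb
        · exact hwin a (by simp [ha]) b (by simp [hb])
        · have := hwin a (by simp [ha]) h (by simp)
          rw [hLlen b hb]; omega
        · have := List.rel_of_pairwise_cons hpw hb
          rw [hLlen a ha]; omega
        · rw [hLlen a ha, hLlen b hb]; omega
      have hlen' : ∀ r ∈ t ++ L, ans'.length ≤ r.length + 1 := by
        intro r hr
        have hal : ans'.length ≤ h.length + 1 := hfold.2.2.2
        rcases List.mem_append.mp hr with hr | hr
        · have := List.rel_of_pairwise_cons hpw hr; omega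
        · rw [hLlen r hr]; omega
      have hag' : ans' = [] ∨ pvGood sl k ans' := by
        rcases hfold.1 with he | he
        · rw [hansdef, he]; exact hans
        · exact Or.inr (hLgood _ he)
      have hqans' : ∀ r ∈ t ++ L, r ≠ [] → pvKeyLe r ans' := by
        intro r hr hrne
        rcases List.mem_append.mp hr with hr | hr
        · exact pvKeyLe_trans (hqans r (by simp [hr]) hrne) hfold.2.1
        · exact hfold.2.2.1 r hr
      have hcomp' : ∀ p, pvGood sl k p → pvKeyLe p ans' ∨ ∃ r ∈ t ++ L, r <+: p := by
        intro p hp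
        rcases hcomp p hp with hk1 | ⟨r, hr, hrp⟩
        · exact Or.inl (pvKeyLe_trans hk1 hfold.2.1)
        · rcases List.mem_cons.mp hr with rfl | hrt
          · by_cases hph : p = r
            · subst hph
              have hpne : p ≠ [] := hp.1
              exact Or.inl (pvKeyLe_trans (hqans p (by simp) hpne) hfold.2.1)
            · obtain ⟨c, helig, hpref, hdet⟩ := pvGood_step hp hrp (fun he => hph he.symm)
              right
              refine ⟨r ++ [c], List.mem_append.mpr (Or.inr ?_), hpref⟩
              rw [hLdef]
              simp only [List.mem_map, List.mem_filter]
              exact ⟨c, ⟨(hch c).mpr helig, hdet⟩, rfl⟩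
          · exact Or.inr ⟨r, List.mem_append.mpr (Or.inl hrt), hrp⟩
      exact ih (t ++ L) ans' hmu' hq' hpw' hwin' hlen' hag' hqans' hcomp'

-- ===== DFS characterization =====
theorem pvDfs_main (sl : List Char) (k : Int) (chars : List Char)
    (hpre : 1 ≤ k ∨ sl = [])
    (hch : ∀ c, c ∈ chars ↔ pvElig sl k c) :
    ∀ (fuel : Nat) (curr cs best : List Char),
    (curr = [] ∨ pvGood sl k curr) →
    (∀ c ∈ cs, c ∈ chars) →
    sl.length + 1 ≤ fuel + curr.length →
    (best = [] ∨ pvGood sl k best) →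
    (pvDfs sl k chars fuel curr cs best = [] ∨ pvGood sl k (pvDfs sl k chars fuel curr cs best)) ∧
    pvKeyLe best (pvDfs sl k chars fuel curr cs best) ∧
    (∀ p, pvGood sl k p → (∃ c ∈ cs, (curr ++ [c]) <+: p) →
      pvKeyLe p (pvDfs sl k chars fuel curr cs best)) := by
  intro fuel
  induction fuel using Nat.strong_induction_on with
  | _ fuel ihf =>
    intro curr cs best hcurr hcs hfuel hbest
    revert hcs best
    induction cs with
    | nil =>
      intro best hcs hbest
      simp only [pvDfs]
      refine ⟨hbest, pvKeyLe_refl best, ?_⟩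
      rintro p hp ⟨c, hc, -⟩
      simp at hc
    | cons c cs' ihc =>
      intro best hcs hbest
      have hcin : c ∈ chars := hcs c (by simp)
      have hcs' : ∀ x ∈ cs', x ∈ chars := fun x hx => hcs x (by simp [hx])
      by_cases hd : pvDetect (curr ++ [c]) sl k = true
      · have hgoodc : pvGood sl k (curr ++ [c]) := pvGood_child hcurr ((hch c).mp hcin) hd
        have hbnd : (curr ++ [c]).length ≤ sl.length := (pvDetect_good hpre hd).2
        have hclen : curr.length + 1 ≤ sl.length := by simpa using hbnd
        cases fuel with
        | zero => exfalso; omega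
        | succ fuel' =>
          simp only [pvDfs, hd, if_true]
          have hbest1 : pvOpB best (curr ++ [c]) = [] ∨ pvGood sl k (pvOpB best (curr ++ [c])) := by
            rcases pvOpB_cases best (curr ++ [c]) with he | he <;> rw [he]
            · exact hbest
            · exact Or.inr hgoodc
          have hsub := ihf fuel' (Nat.lt_succ_self fuel') (curr ++ [c]) chars
            (pvOpB best (curr ++ [c])) (Or.inr hgoodc) (fun x hx => hx)
            (by simp only [List.length_append, List.length_cons, List.length_nil]; omega) hbest1
          have hr := ihc (pvDfs sl k chars fuel' (curr ++ [c]) chars (pvOpB best (curr ++ [c]))) hcs' hsub.1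
          refine ⟨hr.1, ?_, ?_⟩
          · exact pvKeyLe_trans (pvKeyLe_opB_left best (curr ++ [c]))
              (pvKeyLe_trans hsub.2.1 hr.2.1)
          · rintro p hp ⟨c0, hc0, hpref⟩
            rcases List.mem_cons.mp hc0 with rfl | hc0'
            · by_cases hpc : p = curr ++ [c0]
              · subst hpc
                exact pvKeyLe_trans (pvKeyLe_opB_right best _)
                  (pvKeyLe_trans hsub.2.1 hr.2.1)
              · obtain ⟨c1, helig1, hpref1, -⟩ := pvGood_step hp hpref (fun he => hpc he.symm)
                have := hsub.2.2 p hp ⟨c1, (hch c1).mpr helig1, hpref1⟩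
                exact pvKeyLe_trans this hr.2.1
            · exact hr.2.2 p hp ⟨c0, hc0', hpref⟩
      · have hstep' : pvDfs sl k chars fuel curr (c :: cs') best
            = pvDfs sl k chars fuel curr cs' best := by
          cases fuel <;> simp [pvDfs, hd]
        rw [hstep']
        have hr := ihc best hcs' hbest
        refine ⟨hr.1, hr.2.1, ?_⟩
        rintro p hp ⟨c0, hc0, hpref⟩
        rcases List.mem_cons.mp hc0 with rfl | hc0'
        · exact absurd (hp.2.2 (curr ++ [c0]) (by simp) hpref) hd
        · exact hr.2.2 p hp ⟨c0, hc0', hpref⟩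

-- ===== VERDICT (by name: the statement is the Claim_ definition above) =====
theorem longestSubsequenceRepeatedK_spec : Claim_equal_longestSubsequenceRepeatedK := by
  intro s k _ hpre
  unfold Spec_longestSubsequenceRepeatedK
  simp only [longestSubsequenceRepeatedK, longestSubsequenceRepeatedK_alt]
  have hpre' : 1 ≤ k ∨ s.toList = [] := by
    rcases hpre with hk | hs
    · exact Or.inl hk
    · right; rw [hs]; rfl
  set sl := s.toList with hsl
  set charsA := ((PySem.Dict.counter sl).items.filter (fun kv => k ≤ kv.2)).map Prod.fst with hAdef
  set charsB := PySem.List.sorted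
    (((PySem.Dict.counter sl).items.filter (fun kv => k ≤ kv.2)).map Prod.fst) (fun x => x) false with hBdef
  have hA : ∀ c, c ∈ charsA ↔ pvElig sl k c := by
    intro c
    rw [hAdef]
    unfold pvElig
    simp [PySem.Dict.items_counter, List.filter_map, PySem.Set.mem_ofList]
  have hB : ∀ c, c ∈ charsB ↔ pvElig sl k c := by
    intro c
    rw [hBdef]
    unfold pvElig
    simp [PySem.List.mem_sorted, PySem.Dict.items_counter, List.filter_map, PySem.Set.mem_ofList]
  have RA := pvBfs_main sl k charsA hpre' hA ((charsA.length + 1) ^ (sl.length + 2)) [[]] []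
    (by
      have hle : (charsA.length + 1) ^ (sl.length + 1 - List.length ([] : List Char))
          ≤ (charsA.length + 1) ^ (sl.length + 2) :=
        Nat.pow_le_pow_right (Nat.succ_le_succ (Nat.zero_le _)) (by simp)
      simpa [pvMu] using hle)
    (by intro r hr; simp at hr; exact Or.inl hr)
    (by simp)
    (by intro a ha b hb; simp at ha hb; subst ha; subst hb; simp)
    (by intro r hr; simp at hr; subst hr; simp)
    (Or.inl rfl)
    (by intro r hr hrne; simp at hr; exact absurd hr hrne)
    (by intro p hp; exact Or.inr ⟨[], by simp, List.nil_prefix⟩)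
  have RB := pvDfs_main sl k charsB hpre' hB (sl.length + 1) [] charsB []
    (Or.inl rfl) (fun x hx => hx) (by simp) (Or.inl rfl)
  have hBall : ∀ p, pvGood sl k p →
      pvKeyLe p (pvDfs sl k charsB (sl.length + 1) [] charsB []) := by
    intro p hp
    obtain ⟨c, p', rfl⟩ : ∃ c p', p = c :: p' := by
      cases p with
      | nil => exact absurd rfl hp.1
      | cons c p' => exact ⟨c, p', rfl⟩
    exact RB.2.2 _ hp ⟨c, (hB c).mpr (hp.2.1 c (by simp)), by simp⟩
  set a := pvBfs sl k charsA ((charsA.length + 1) ^ (sl.length + 2)) [[]] [] with hadef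
  set b := pvDfs sl k charsB (sl.length + 1) [] charsB [] with hbdef
  have hab : a = b := by
    rcases RA.1 with ha | ha
    · rcases RB.1 with hb | hb
      · rw [ha, hb]
      · exfalso
        have hba := RA.2 b hb
        rw [ha] at hba
        exact hb.1 ((pvKeyLe_nil_iff b).mp hba)
    · rcases RB.1 with hb | hb
      · exfalso
        have hab2 := hBall a ha
        rw [hb] at hab2
        exact ha.1 ((pvKeyLe_nil_iff a).mp hab2)
      · exact pvKeyLe_antisymm (hBall a ha) (RA.2 b hb)
  rw [hab]
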